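-- pv_equiv track=rewrite | github.com/ShellKhan/my_python_repo | homeworks/lesson4/ex6_2.py | my_iterator
-- ===== SOURCE A (Python) =====
-- from itertools import cycle
--
-- def my_iterator(source: str, stop: int) -> int:
--     counter = 1
--     for el in cycle(source):
--         if counter <= stop:
--             yield el
--             counter += 1
--         else:
--             break
-- ===== SOURCE B (Python) =====
-- def my_iterator(source: str, stop: int):
--     # Build the whole output at once: stop = q full copies of source plus a
--     # prefix of length r, via divmod and string repetition (no per-character
--     # loop or cycle iterator), then yield from that prebuilt string.
--     n = len(source)
--     if n == 0 or stop <= 0: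
--         return
--     q, r = divmod(stop, n)
--     yield from source * q + source[:r]
-- ===== Notes on version B (the rewrite author's own statement) =====
-- stated objective: alternative
-- what changed: B replaces A's per-character infinite cycle iterator with counter-and-break by a closed-form construction: divmod(stop, len(source)) gives q full copies and a remainder prefix, and the output is built in one shot as source * q + source[:r].
import Mathlib
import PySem

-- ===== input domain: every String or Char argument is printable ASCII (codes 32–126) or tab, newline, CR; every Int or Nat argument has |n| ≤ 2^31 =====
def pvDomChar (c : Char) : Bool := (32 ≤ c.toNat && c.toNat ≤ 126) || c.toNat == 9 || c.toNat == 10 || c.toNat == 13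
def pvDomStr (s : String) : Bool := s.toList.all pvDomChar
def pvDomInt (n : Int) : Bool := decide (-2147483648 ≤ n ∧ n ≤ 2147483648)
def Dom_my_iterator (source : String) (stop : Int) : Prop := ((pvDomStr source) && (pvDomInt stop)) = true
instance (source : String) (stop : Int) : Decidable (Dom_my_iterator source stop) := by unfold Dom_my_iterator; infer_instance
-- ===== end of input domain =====

-- B builds the yielded sequence in closed form — divmod(stop, len) into q full copies of source
-- plus a remainder prefix — instead of A's per-character cycle iterator with a counter
-- (objective: alternative); both are iterators, so the equivalence is about the list of yields.


-- ===== PORT A =====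
-- `for el in cycle(source)`: `rest` is the part of the current pass through `source` not yet
-- consumed; when it runs out the cycle refills it from `chars` (an empty `chars` ends the loop,
-- as cycle('') is an exhausted iterator). `counter` starts at 1; the loop breaks when counter > stop.
def myIterLoopA (chars : List Char) (stop counter : Int) (rest : List Char) : List String :=
  if counter ≤ stop then
    match rest with
    | [] =>
      match chars with
      | [] => []
      | c :: cs => String.ofList [c] :: myIterLoopA chars stop (counter + 1) cs
    | c :: rs => String.ofList [c] :: myIterLoopA chars stop (counter + 1) rs
  else []
termination_by (stop + 1 - counter).toNat
decreasing_by all_goals omega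

def my_iterator (source : String) (stop : Int) : List String :=
  myIterLoopA source.toList stop 1 source.toList

-- ===== PORT B =====
-- `if n == 0 or stop <= 0: return iter(())`; else `q, r = divmod(stop, n)` and the result is
-- the characters of `source * q + source[:r]`, each yielded as a one-character string.
def my_iterator_alt (source : String) (stop : Int) : List String :=
  let chars := source.toList
  let n : Int := chars.length
  if n = 0 ∨ stop ≤ 0 then []
  else
    let q := PySem.Int.floordiv stop n
    let r := PySem.Int.mod stop n
    (((List.replicate q.toNat chars).flatten ++ PySem.List.slice chars none (some r)).map
      (fun c => String.ofList [c]))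

-- ===== PRECONDITION & SPEC =====
def Spec_my_iterator (source : String) (stop : Int) (out : List String) : Prop := out = my_iterator_alt source stop
instance (source : String) (stop : Int) (out : List String) : Decidable (Spec_my_iterator source stop out) := by unfold Spec_my_iterator; infer_instance

-- ===== CLAIM (what is proved, stated in full; the proofs are below) =====
def Claim_equal_my_iterator : Prop := ∀ (source : String) (stop : Int), Dom_my_iterator source stop → Spec_my_iterator source stop (my_iterator source stop)

-- ===== LEMMAS AND PROOFS =====

theorem myIterLoopA_nil (stop counter : Int) : myIterLoopA [] stop counter [] = [] := by
  unfold myIterLoopA; split <;> rfl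

-- Loop invariant for A's cycle: having consumed p characters of the current pass
-- (so rest = chars.drop p, p ≤ len) with m yields still to produce, the remaining
-- yields are chars[(p+k) % len] for k < m.
theorem myIterLoopA_spec (m : Nat) (chars : List Char) (hne : chars ≠ [])
    (stop counter : Int) (p : Nat) (hp : p ≤ chars.length)
    (hm : stop + 1 - counter = (m : Int)) :
    myIterLoopA chars stop counter (chars.drop p) =
      (List.range m).map (fun k => String.ofList [(chars[(p + k) % chars.length]?).getD ' ']) := by
  induction m generalizing counter p with
  | zero =>
    unfold myIterLoopA
    rw [if_neg (by omega)]
    simp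
  | succ m ih =>
    have hlen : 0 < chars.length := List.length_pos_iff.mpr hne
    unfold myIterLoopA
    rw [if_pos (by omega)]
    by_cases hlt : p < chars.length
    · have hdrop : chars.drop p = chars[p] :: chars.drop (p + 1) :=
        List.drop_eq_getElem_cons hlt
      rw [hdrop]
      have := ih (counter + 1) (p + 1) (by omega) (by omega)
      rw [List.range_succ_eq_map]
      simp only [List.map_cons, List.map_map]
      congr 1
      · simp [Nat.mod_eq_of_lt hlt, List.getElem?_eq_getElem hlt]
      · rw [this]
        apply List.map_congr_left
        intro k _
        simp [Function.comp, Nat.add_assoc, Nat.add_comm 1 k]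
    · have hpe : p = chars.length := by omega
      rw [hpe, List.drop_length]
      match chars, hne with
      | c :: cs, _ =>
        have hih := ih (counter + 1) 1 (by simp) (by omega)
        simp only [List.drop_one, List.tail_cons] at hih
        rw [List.range_succ_eq_map]
        simp only [List.map_cons, List.map_map]
        congr 1
        · simp
        · rw [hih]
          apply List.map_congr_left
          intro k _
          simp [Function.comp, Nat.add_comm 1 k]

-- B's block construction equals the modular description: q copies of chars plus a prefix
-- of length r is range (q*n + r) mapped through k ↦ chars[k % n].
theorem blocks_eq_range (chars : List Char) (hne : chars ≠ []) (q r : Nat)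
    (hr : r ≤ chars.length) :
    (List.replicate q chars).flatten ++ chars.take r =
      (List.range (q * chars.length + r)).map (fun k => (chars[k % chars.length]?).getD ' ') := by
  have hlen : 0 < chars.length := List.length_pos_iff.mpr hne
  induction q with
  | zero =>
    simp only [List.replicate_zero, List.flatten_nil, List.nil_append, Nat.zero_mul, Nat.zero_add]
    apply List.ext_getElem
    · simp [hr]
    · intro i h1 h2
      have hi : i < r := by simpa [hr] using h1
      have hin : i < chars.length := by omega
      simp [Nat.mod_eq_of_lt hin, List.getElem?_eq_getElem hin]
  | succ q ih =>
    have hsplit : (q + 1) * chars.length + r = chars.length + (q * chars.length + r) := by ring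
    rw [hsplit, List.range_add, List.map_append, List.replicate_succ, List.flatten_cons,
        List.append_assoc, ih]
    congr 1
    · apply List.ext_getElem
      · simp
      · intro i h1 h2
        have hin : i < chars.length := by simpa using h1
        simp [Nat.mod_eq_of_lt hin, List.getElem?_eq_getElem hin]
    · rw [List.map_map]
      apply List.map_congr_left
      intro k _
      simp [Function.comp, Nat.add_mod_left]

-- ===== VERDICT (by name: the statement is the Claim_ definition above) =====
theorem my_iterator_spec : Claim_equal_my_iterator := by
  intro source stop _
  unfold Spec_my_iterator my_iterator my_iterator_alt
  by_cases hnil : source.toList = []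
  · simp only [hnil]
    rw [myIterLoopA_nil]
    simp
  · have hlen : 0 < source.toList.length := List.length_pos_iff.mpr hnil
    by_cases hstop : stop ≤ 0
    · rw [if_pos (Or.inr hstop)]
      unfold myIterLoopA
      rw [if_neg (by omega)]
    · rw [if_neg (by rintro (h | h) <;> omega)]
      set chars := source.toList with hchars
      set n : Nat := chars.length with hn
      have hA := myIterLoopA_spec stop.toNat chars hnil stop 1 0 (by omega) (by omega)
      rw [List.drop_zero] at hA
      rw [hA]
      -- reduce B's Int divmod to Nat divmod on m = stop.toNat
      have hstopcast : stop = ((stop.toNat : Nat) : Int) := by omega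
      have hq : PySem.Int.floordiv stop (n : Int) = ((stop.toNat / n : Nat) : Int) := by
        rw [hstopcast]; exact PySem.Int.floordiv_natCast _ _
      have hrr : PySem.Int.mod stop (n : Int) = ((stop.toNat % n : Nat) : Int) := by
        rw [hstopcast]; exact PySem.Int.mod_natCast _ _
      simp only [hq, hrr, Int.toNat_natCast, PySem.List.slice_to_natCast]
      rw [blocks_eq_range chars hnil (stop.toNat / n) (stop.toNat % n)
            (le_of_lt (Nat.mod_lt _ hlen))]
      have hdm : stop.toNat / n * n + stop.toNat % n = stop.toNat := by
        rw [Nat.mul_comm]; exact Nat.div_add_mod _ _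
      rw [← hn, hdm, List.map_map]
      apply List.map_congr_left
      intro k _
      simp [Function.comp]
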